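-- pv_equiv track=rewrite | github.com/qn06142/coding-python | cvahn_m2ck116yn.py | minColumn
-- ===== SOURCE A (Python) =====
-- def minColumn(my_list):
--
--     m = len(my_list)
--     n = len(my_list[0])
--
--     list2 = []  # stores the column wise minimas
--     for col in range(n):  # iterate over all columns
--         col_min = my_list[0][col]  # assume the first element of the column(the top most) is the minimum
--         for row in range(1, m):  # iterate over the column(top to down)
--
--             col_min = min(col_min, my_list[row][col])
--
--         list2.append(col_min)
--     return tuple(list2)
-- ===== SOURCE B (Python) =====
-- def minColumn(my_list):
--     result = list(my_list[0])
--     for row in my_list[1:]: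
--         result = [min(r, v) for r, v in zip(result, row)]
--     return tuple(result)
-- ===== Notes on version B (the rewrite author's own statement) =====
-- stated objective: simpler
-- what changed: Replaces the column-major nested index loops with a single row-major sweep that maintains a running vector of per-column minima via zip, with no index arithmetic.
import Mathlib
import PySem

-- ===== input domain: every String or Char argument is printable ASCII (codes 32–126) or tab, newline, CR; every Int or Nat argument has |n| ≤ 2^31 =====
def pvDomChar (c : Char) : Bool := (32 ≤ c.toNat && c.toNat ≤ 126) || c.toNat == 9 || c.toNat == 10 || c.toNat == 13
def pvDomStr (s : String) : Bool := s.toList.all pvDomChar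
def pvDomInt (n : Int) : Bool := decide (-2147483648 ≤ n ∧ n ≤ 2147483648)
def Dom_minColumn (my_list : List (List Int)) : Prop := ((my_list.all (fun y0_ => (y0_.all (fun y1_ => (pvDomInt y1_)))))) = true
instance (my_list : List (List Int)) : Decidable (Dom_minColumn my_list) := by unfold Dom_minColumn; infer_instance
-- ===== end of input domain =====

-- B replaces A's column-major nested index loops by a single row-major sweep
-- maintaining a running vector of per-column minima (simpler; same asymptotic cost).
-- A mutates nothing; both return the column-wise minima (Python tuple -> List Int).


-- ===== PORT A =====
def minColumn (my_list : List (List Int)) : List Int :=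
  let m : Int := my_list.length
  let n : Int := (PySem.List.pyGetD my_list 0 []).length
  (PySem.List.pyRange 0 n 1).foldl (fun list2 col =>
    let col_min := PySem.List.pyGetD (PySem.List.pyGetD my_list 0 []) col 0
    let col_min := (PySem.List.pyRange 1 m 1).foldl (fun cm row =>
      min cm (PySem.List.pyGetD (PySem.List.pyGetD my_list row []) col 0)) col_min
    list2 ++ [col_min]) []

-- ===== PORT B =====
def minColumn_alt (my_list : List (List Int)) : List Int :=
  match my_list with
  | [] => []  -- Python B raises IndexError here (outside Pre_)
  | first :: rest =>
    rest.foldl (fun result row => (result.zip row).map (fun p => min p.1 p.2)) first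

-- ===== PRECONDITION & SPEC =====
-- Pre_ excludes exactly the inputs where A raises: the empty matrix (my_list[0] is an
-- IndexError) and matrices with a row shorter than the first row (my_list[row][col] raises).
def Pre_minColumn (my_list : List (List Int)) : Prop :=
  my_list ≠ [] ∧ ∀ row ∈ my_list, (my_list.headD []).length ≤ row.length
instance (my_list : List (List Int)) : Decidable (Pre_minColumn my_list) := by
  unfold Pre_minColumn; infer_instance
def pvWitness_minColumn : List (List Int) := [[3, 1], [2, 4]]

def Spec_minColumn (my_list : List (List Int)) (out : List Int) : Prop := out = minColumn_alt my_list
instance (my_list : List (List Int)) (out : List Int) : Decidable (Spec_minColumn my_list out) := by unfold Spec_minColumn; infer_instance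

-- ===== CLAIM (what is proved, stated in full; the proofs are below) =====
def Claim_equal_minColumn : Prop := ∀ (my_list : List (List Int)), Dom_minColumn my_list → Pre_minColumn my_list → Spec_minColumn my_list (minColumn my_list)

-- ===== LEMMAS AND PROOFS =====

-- A computes, for each column k, the fold of min down the remaining rows.
theorem minColumn_char (first : List Int) (rest : List (List Int)) :
    minColumn (first :: rest) =
      (List.range first.length).map
        (fun k => rest.foldl (fun cm r => min cm (r.getD k 0)) (first.getD k 0)) := by
  unfold minColumn
  simp only []
  rw [PySem.List.foldl_append_singleton_eq_map]
  have hdrop :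
      ∀ (colMin : Int) (col : Int),
        (PySem.List.pyRange 1 ((first :: rest).length : Int) 1).foldl
          (fun cm row => min cm (PySem.List.pyGetD (PySem.List.pyGetD (first :: rest) row []) col 0))
          colMin
        = rest.foldl (fun cm r => min cm (PySem.List.pyGetD r col 0)) colMin := by
    intro colMin col
    rw [PySem.List.foldl_pyRange_pyGetD' (first :: rest) []
        (fun cm r => min cm (PySem.List.pyGetD r col 0)) colMin (by omega)]
    rfl
  simp only [PySem.List.pyGetD_zero_cons, hdrop]
  rw [PySem.List.pyRange_one, List.map_map]
  apply List.map_congr_left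
  intro k hk
  simp [PySem.List.pyGetD_natCast]

-- B maintains the running column-minima vector; characterised the same way.
theorem minColumn_alt_char (rest : List (List Int)) :
    ∀ (first : List Int), (∀ r ∈ rest, first.length ≤ r.length) →
      rest.foldl (fun result row => (result.zip row).map (fun p => min p.1 p.2)) first =
        (List.range first.length).map
          (fun k => rest.foldl (fun cm r => min cm (r.getD k 0)) (first.getD k 0)) := by
  induction rest with
  | nil =>
    intro first _
    apply List.ext_getElem (by simp)
    intro i h1 h2
    simp only [List.foldl_nil] at h1
    simp [List.getElem?_eq_getElem h1]
  | cons row rest ih =>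
    intro first h
    have hrow : first.length ≤ row.length := h row (List.mem_cons_self)
    have hlen : ((first.zip row).map (fun p => min p.1 p.2)).length = first.length := by
      simp [Nat.min_eq_left hrow]
    simp only [List.foldl_cons]
    rw [ih _ (by intro r hr; rw [hlen]; exact h r (List.mem_cons_of_mem _ hr))]
    rw [hlen]
    apply List.map_congr_left
    intro k hk
    have hk' : k < first.length := List.mem_range.mp hk
    congr 1
    rw [List.getD_eq_getElem _ _ (by omega),
        List.getD_eq_getElem _ _ (by omega),
        List.getD_eq_getElem _ _ (by omega : k < row.length)]
    simp [List.getElem_zip]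

-- ===== VERDICT (by name: the statement is the Claim_ definition above) =====
theorem minColumn_spec : Claim_equal_minColumn := by
  intro my_list _ hpre
  unfold Spec_minColumn
  obtain ⟨hne, hrows⟩ := hpre
  match my_list with
  | [] => exact absurd rfl hne
  | first :: rest =>
    rw [minColumn_char,
      show minColumn_alt (first :: rest) =
          rest.foldl (fun result row => (result.zip row).map (fun p => min p.1 p.2)) first from rfl,
      minColumn_alt_char rest first
        (by intro r hr; exact hrows r (List.mem_cons_of_mem _ hr))]
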